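-- pv_equiv track=rewrite | github.com/River-Mt/Algorithm | 프로그래머스/lv0/120866. 안전지대/안전지대.py | getSafeCnt
-- ===== SOURCE A (Python) =====
-- def getSafeCnt(bombs, n, m):
--     dirs = [(-1, -1), (-1, 0), (-1, 1), (0, -1), (0, 0), (0, 1), (1, -1), (1, 0), (1, 1)]
--     tmp = [[1] * m for _ in range(n)]
--
--     for bomb in bombs:
--         for d in dirs:
--             r = bomb[0] + d[0]
--             c = bomb[1] + d[1]
--             if r < 0 or c < 0 or r >= n or c >= m: continue
--             tmp[r][c] = 0
--
--     ret = 0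
--
--     for rows in tmp:
--         ret += sum(rows)
--
--     return ret
-- ===== SOURCE B (Python) =====
-- def getSafeCnt(bombs, n, m):
--     danger = {(b[0], b[1]) for b in bombs}
--     cnt = 0
--     for r in range(n):
--         for c in range(m):
--             if all((r + dr, c + dc) not in danger
--                    for dr in (-1, 0, 1) for dc in (-1, 0, 1)):
--                 cnt += 1
--     return cnt
-- ===== Notes on version B (the rewrite author's own statement) =====
-- stated objective: alternative
-- what changed: Instead of painting an n*m 0/1 grid by iterating bombs x 9 offsets and summing rows, B builds a set of bomb coordinates once and scans the grid, counting cells none of whose 9 neighbourhood positions is a bomb; Pre_ excludes only bomb entries with fewer than two coordinates, where A raises IndexError.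
import Mathlib
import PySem

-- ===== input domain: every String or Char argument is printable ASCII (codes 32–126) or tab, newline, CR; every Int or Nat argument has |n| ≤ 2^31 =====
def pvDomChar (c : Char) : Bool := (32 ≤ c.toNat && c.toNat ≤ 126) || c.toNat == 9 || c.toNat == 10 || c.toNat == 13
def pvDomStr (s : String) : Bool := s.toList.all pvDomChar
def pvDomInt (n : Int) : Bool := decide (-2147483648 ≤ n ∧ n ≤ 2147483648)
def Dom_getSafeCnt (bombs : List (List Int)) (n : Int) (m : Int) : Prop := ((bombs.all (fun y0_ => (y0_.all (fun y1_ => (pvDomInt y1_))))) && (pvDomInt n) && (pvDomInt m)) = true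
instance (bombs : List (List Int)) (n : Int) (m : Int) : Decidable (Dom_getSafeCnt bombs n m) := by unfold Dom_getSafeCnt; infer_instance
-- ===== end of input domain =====

-- B replaces A's painted 0/1 danger grid by a set of bomb coordinates queried per grid cell (a different decomposition, same cost).

-- ===== PORT A =====
def pvDirs : List (Int × Int) := [(-1,-1),(-1,0),(-1,1),(0,-1),(0,0),(0,1),(1,-1),(1,0),(1,1)]

-- tmp[r][c] = 0 after the in-range guard: indices are nonnegative and in range, pySetD/pyGetD are exact here
def pvMark (n m : Int) (t : List (List Int)) (r c : Int) : List (List Int) :=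
  if r < 0 ∨ c < 0 ∨ n ≤ r ∨ m ≤ c then t
  else PySem.List.pySetD t r (PySem.List.pySetD (PySem.List.pyGetD t r []) c 0)

def getSafeCnt (bombs : List (List Int)) (n : Int) (m : Int) : Int :=
  let tmp0 := List.replicate n.toNat (List.replicate m.toNat (1 : Int))
  let tmp := bombs.foldl (fun t bomb =>
      pvDirs.foldl (fun t d =>
        pvMark n m t (PySem.List.pyGetD bomb 0 0 + d.1) (PySem.List.pyGetD bomb 1 0 + d.2)) t) tmp0
  tmp.foldl (fun ret rows => ret + rows.foldl (· + ·) 0) 0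

-- ===== PORT B =====
def getSafeCnt_alt (bombs : List (List Int)) (n : Int) (m : Int) : Int :=
  let danger : PySem.Set (Int × Int) :=
    PySem.Set.ofList (bombs.map fun b => (PySem.List.pyGetD b 0 0, PySem.List.pyGetD b 1 0))
  (PySem.List.pyRange 0 n 1).foldl (fun cnt r =>
    (PySem.List.pyRange 0 m 1).foldl (fun cnt c =>
      if [(-1:Int),0,1].all (fun dr => [(-1:Int),0,1].all fun dc =>
            !(PySem.Set.contains danger (r + dr, c + dc)))
      then cnt + 1 else cnt) cnt) 0

-- ===== PRECONDITION & SPEC =====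
-- Pre_ excludes only inputs where a bomb entry has fewer than two coordinates: there Python A raises IndexError (and B raises too).
def Pre_getSafeCnt (bombs : List (List Int)) (n : Int) (m : Int) : Prop :=
  ∀ b ∈ bombs, 2 ≤ b.length
instance (bombs : List (List Int)) (n : Int) (m : Int) : Decidable (Pre_getSafeCnt bombs n m) := by
  unfold Pre_getSafeCnt; infer_instance

def pvWitness_getSafeCnt : List (List Int) × Int × Int := ([[0, 0], [2, 3]], 4, 4)

def Spec_getSafeCnt (bombs : List (List Int)) (n : Int) (m : Int) (out : Int) : Prop := out = getSafeCnt_alt bombs n m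
instance (bombs : List (List Int)) (n : Int) (m : Int) (out : Int) : Decidable (Spec_getSafeCnt bombs n m out) := by unfold Spec_getSafeCnt; infer_instance

-- ===== CLAIM (what is proved, stated in full; the proofs are below) =====
def Claim_equal_getSafeCnt : Prop := ∀ (bombs : List (List Int)) (n : Int) (m : Int), Dom_getSafeCnt bombs n m → Pre_getSafeCnt bombs n m → Spec_getSafeCnt bombs n m (getSafeCnt bombs n m)

-- ===== LEMMAS AND PROOFS =====

-- The cell (i, j) is hit by a mark at integer coordinates (r, c)
def pvHit (n m r c : Int) (i j : Nat) : Bool :=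
  decide (0 ≤ r) && decide (r < n) && decide (0 ≤ c) && decide (c < m) && (r == (i : Int)) && (c == (j : Int))

-- a grid as a function of its indices
def pvGrid (N M : Nat) (f : Nat → Nat → Int) : List (List Int) :=
  (List.range N).map fun i => (List.range M).map (f i)

theorem pvGrid_replicate (N M : Nat) :
    List.replicate N (List.replicate M (1 : Int)) = pvGrid N M (fun _ _ => 1) := by
  simp [pvGrid, List.map_const']

theorem pvMark_grid (n m r c : Int) (f : Nat → Nat → Int) :
    pvMark n m (pvGrid n.toNat m.toNat f) r c
      = pvGrid n.toNat m.toNat (fun i j => if pvHit n m r c i j then 0 else f i j) := by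
  unfold pvMark
  split
  · rename_i hout
    unfold pvGrid
    apply List.map_congr_left
    intro i hi
    apply (List.map_congr_left ?_).symm
    intro j hj
    show (if pvHit n m r c i j = true then (0:Int) else f i j) = f i j
    rw [if_neg]
    simp only [pvHit, Bool.and_eq_true, decide_eq_true_eq, beq_iff_eq, not_and]
    intro h
    omega
  · rename_i hout
    push_neg at hout
    obtain ⟨hr0, hc0, hrn, hcm⟩ := hout
    have hrN : r.toNat < n.toNat := by omega
    have hcM : c.toNat < m.toNat := by omega
    rw [PySem.List.pySetD_of_nonneg _ _ hr0, PySem.List.pySetD_of_nonneg _ _ hc0,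
        PySem.List.pyGetD_of_nonneg _ _ hr0]
    unfold pvGrid
    rw [PySem.List.getD_map_range _ _ _ _ hrN]
    apply List.ext_getElem
    · simp
    · intro i hi1 hi2
      simp only [List.length_set, List.length_map, List.length_range] at hi1
      rw [List.getElem_set, List.getElem_map, List.getElem_map]
      simp only [List.getElem_range]
      by_cases hir : i = r.toNat
      · subst hir
        rw [if_pos rfl]
        apply List.ext_getElem
        · simp
        · intro j hj1 hj2
          simp only [List.length_set, List.length_map, List.length_range] at hj1
          rw [List.getElem_set, List.getElem_map, List.getElem_map]
          simp only [List.getElem_range]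
          by_cases hjc : j = c.toNat
          · subst hjc
            rw [if_pos rfl, if_pos]
            simp only [pvHit, Bool.and_eq_true, decide_eq_true_eq, beq_iff_eq]
            refine ⟨⟨⟨⟨⟨by omega, by omega⟩, by omega⟩, by omega⟩, by omega⟩, by omega⟩
          · rw [if_neg (Ne.symm hjc), if_neg]
            simp only [pvHit, Bool.and_eq_true, decide_eq_true_eq, beq_iff_eq, not_and]
            intro h
            omega
      · rw [if_neg (Ne.symm hir)]
        apply (List.map_congr_left ?_).symm
        intro j hj
        show (if pvHit n m r c i j = true then (0:Int) else f i j) = f i j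
        rw [if_neg]
        simp only [pvHit, Bool.and_eq_true, decide_eq_true_eq, beq_iff_eq, not_and]
        intro h
        omega

theorem pvFold_flat {α β σ : Type} (l : List α) (g : α → List β) (step : σ → β → σ) (s : σ) :
    l.foldl (fun t x => (g x).foldl step t) s = (l.flatMap g).foldl step s := by
  induction l generalizing s with
  | nil => rfl
  | cons x l ih => simp [List.flatMap_cons, List.foldl_append, ih]

theorem pvFold_mark (n m : Int) (ps : List (Int × Int)) (f : Nat → Nat → Int) :
    ps.foldl (fun t p => pvMark n m t p.1 p.2) (pvGrid n.toNat m.toNat f)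
      = pvGrid n.toNat m.toNat
          (fun i j => if ps.any (fun p => pvHit n m p.1 p.2 i j) then 0 else f i j) := by
  induction ps generalizing f with
  | nil => simp
  | cons p ps ih =>
    simp only [List.foldl_cons, pvMark_grid, ih, List.any_cons]
    congr 1
    funext i j
    by_cases h1 : pvHit n m p.1 p.2 i j <;> by_cases h2 : ps.any (fun q => pvHit n m q.1 q.2 i j) <;>
      simp [h1, h2]

-- all marked integer positions, bombs x 9 directions
def pvPS (bombs : List (List Int)) : List (Int × Int) :=
  bombs.flatMap fun b => pvDirs.map fun d =>
    (PySem.List.pyGetD b 0 0 + d.1, PySem.List.pyGetD b 1 0 + d.2)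

def pvMarked (bombs : List (List Int)) (n m : Int) (i j : Nat) : Bool :=
  (pvPS bombs).any fun p => pvHit n m p.1 p.2 i j

theorem pvSumGrid (N M : Nat) (f : Nat → Nat → Int) :
    (pvGrid N M f).foldl (fun ret rows => ret + rows.foldl (· + ·) 0) 0
      = ((List.range N).map (fun i => ((List.range M).map (f i)).sum)).sum := by
  simp only [pvGrid, List.foldl_map, PySem.List.foldl_add, zero_add]

theorem pvA_eq (bombs : List (List Int)) (n m : Int) :
    getSafeCnt bombs n m
      = ((List.range n.toNat).map (fun i =>
          ((List.range m.toNat).map (fun j =>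
            if pvMarked bombs n m i j then (0:Int) else 1)).sum)).sum := by
  simp only [getSafeCnt]
  have h1 :
      bombs.foldl (fun t bomb =>
        pvDirs.foldl (fun t d =>
          pvMark n m t (PySem.List.pyGetD bomb 0 0 + d.1) (PySem.List.pyGetD bomb 1 0 + d.2)) t)
        (List.replicate n.toNat (List.replicate m.toNat (1:Int)))
      = (pvPS bombs).foldl (fun t p => pvMark n m t p.1 p.2)
          (List.replicate n.toNat (List.replicate m.toNat (1:Int))) := by
    rw [pvPS, ← pvFold_flat]
    simp only [List.foldl_map]
  rw [h1, pvGrid_replicate, pvFold_mark, pvSumGrid]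
  rfl

-- B's bomb-coordinate set, before deduplication
def pvCoords (bombs : List (List Int)) : List (Int × Int) :=
  bombs.map fun b => (PySem.List.pyGetD b 0 0, PySem.List.pyGetD b 1 0)

-- B's per-cell safety test
def pvSafe (bombs : List (List Int)) (r c : Int) : Bool :=
  [(-1:Int),0,1].all fun dr => [(-1:Int),0,1].all fun dc =>
    !(PySem.Set.contains (PySem.Set.ofList (pvCoords bombs)) (r + dr, c + dc))

-- (r, c) is unsafe iff some bomb coordinate is within the 3x3 neighbourhood
theorem pvSafe_false_iff (bombs : List (List Int)) (r c : Int) :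
    pvSafe bombs r c = false
      ↔ ∃ p ∈ pvCoords bombs, p.1 - r ≤ 1 ∧ r - p.1 ≤ 1 ∧ p.2 - c ≤ 1 ∧ c - p.2 ≤ 1 := by
  rw [← Bool.not_eq_true]
  simp only [pvSafe, List.all_eq_true, List.mem_cons, List.mem_singleton,
    Bool.not_eq_true', Bool.not_eq_false, PySem.Set.contains, List.contains_eq_mem,
    PySem.Set.mem_ofList, decide_eq_true_eq]
  push_neg
  simp only [List.mem_nil_iff, or_false, ne_eq, Bool.not_eq_false, decide_eq_true_eq]
  constructor
  · rintro ⟨dr, hdr, dc, hdc, hmem⟩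
    have hd1 : -1 ≤ dr ∧ dr ≤ 1 := by rcases hdr with h | h | h <;> simp [h]
    have hd2 : -1 ≤ dc ∧ dc ≤ 1 := by rcases hdc with h | h | h <;> simp [h]
    refine ⟨(r + dr, c + dc), hmem, ?_, ?_, ?_, ?_⟩
    · show r + dr - r ≤ 1; omega
    · show r - (r + dr) ≤ 1; omega
    · show c + dc - c ≤ 1; omega
    · show c - (c + dc) ≤ 1; omega
  · rintro ⟨p, hp, h1, h2, h3, h4⟩
    refine ⟨p.1 - r, by omega, p.2 - c, by omega, ?_⟩
    have : (r + (p.1 - r), c + (p.2 - c)) = p := by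
      obtain ⟨p1, p2⟩ := p
      simp only [Prod.mk.injEq]
      constructor <;> ring
    rw [this]; exact hp

theorem pvMarked_iff (bombs : List (List Int)) (n m : Int) (i j : Nat)
    (hi : i < n.toNat) (hj : j < m.toNat) :
    pvMarked bombs n m i j = true
      ↔ ∃ p ∈ pvCoords bombs,
          p.1 - (i:Int) ≤ 1 ∧ (i:Int) - p.1 ≤ 1 ∧ p.2 - (j:Int) ≤ 1 ∧ (j:Int) - p.2 ≤ 1 := by
  simp only [pvMarked, List.any_eq_true, pvPS, List.mem_flatMap, List.mem_map, pvCoords,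
    pvHit, Bool.and_eq_true, decide_eq_true_eq, beq_iff_eq]
  constructor
  · rintro ⟨p, ⟨b, hb, d, hd, rfl⟩, ⟨⟨⟨⟨_, _⟩, _⟩, _⟩, h1⟩, h2⟩
    obtain ⟨d1, d2⟩ := d
    have hdb : -1 ≤ d1 ∧ d1 ≤ 1 ∧ -1 ≤ d2 ∧ d2 ≤ 1 := by
      simp only [pvDirs, List.mem_cons, Prod.mk.injEq, List.mem_nil_iff, or_false] at hd
      omega
    have h1' : PySem.List.pyGetD b 0 0 + d1 = (i:Int) := h1
    have h2' : PySem.List.pyGetD b 1 0 + d2 = (j:Int) := h2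
    refine ⟨(PySem.List.pyGetD b 0 0, PySem.List.pyGetD b 1 0), ⟨b, hb, rfl⟩, ?_, ?_, ?_, ?_⟩
    · show PySem.List.pyGetD b 0 0 - (i:Int) ≤ 1; omega
    · show (i:Int) - PySem.List.pyGetD b 0 0 ≤ 1; omega
    · show PySem.List.pyGetD b 1 0 - (j:Int) ≤ 1; omega
    · show (j:Int) - PySem.List.pyGetD b 1 0 ≤ 1; omega
  · rintro ⟨p, ⟨b, hb, rfl⟩, h1, h2, h3, h4⟩
    have h1' : PySem.List.pyGetD b 0 0 - (i:Int) ≤ 1 := h1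
    have h2' : (i:Int) - PySem.List.pyGetD b 0 0 ≤ 1 := h2
    have h3' : PySem.List.pyGetD b 1 0 - (j:Int) ≤ 1 := h3
    have h4' : (j:Int) - PySem.List.pyGetD b 1 0 ≤ 1 := h4
    refine ⟨((i:Int), (j:Int)), ⟨b, hb, ((i:Int) - PySem.List.pyGetD b 0 0,
      (j:Int) - PySem.List.pyGetD b 1 0), ?_, ?_⟩, ?_⟩
    · simp only [pvDirs, List.mem_cons, Prod.mk.injEq, List.mem_nil_iff, or_false]
      omega
    · simp only [Prod.mk.injEq]
      constructor <;> ring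
    · exact ⟨⟨⟨⟨⟨by omega, by omega⟩, by omega⟩, by omega⟩, rfl⟩, rfl⟩

-- pyRange 0 n for any Int n
theorem pvRange_eq (n : Int) :
    PySem.List.pyRange 0 n = List.map (fun k : Nat => (k : Int)) (List.range n.toNat) := by
  have h := PySem.List.pyRange_of_pos (a := 0) (b := n) (s := 1) (by omega)
  simp at h
  rw [h]
  by_cases hp : 0 < n
  · rw [if_pos hp]
  · rw [if_neg hp, show n.toNat = 0 by omega]

theorem pvB_eq (bombs : List (List Int)) (n m : Int) :
    getSafeCnt_alt bombs n m
      = (List.map (fun i : Nat =>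
          (List.map (fun j : Nat =>
            if pvSafe bombs (i:Int) (j:Int) then (1:Int) else 0) (List.range m.toNat)).sum)
          (List.range n.toNat)).sum := by
  simp only [getSafeCnt_alt, pvRange_eq, List.foldl_map]
  simp only [PySem.List.foldl_count_if, PySem.List.foldl_add, zero_add]
  simp only [← PySem.List.sum_map_ite_one_zero]
  rfl

-- ===== VERDICT (by name: the statement is the Claim_ definition above) =====
theorem getSafeCnt_spec : Claim_equal_getSafeCnt := by
  intro bombs n m _ _
  show getSafeCnt bombs n m = getSafeCnt_alt bombs n m
  rw [pvA_eq, pvB_eq]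
  apply congrArg List.sum
  apply List.map_congr_left
  intro i hi
  apply congrArg List.sum
  apply List.map_congr_left
  intro j hj
  rw [List.mem_range] at hi hj
  by_cases hs : pvSafe bombs (i:Int) (j:Int) = true
  · rw [if_pos hs, if_neg]
    intro hm
    rw [pvMarked_iff bombs n m i j hi hj] at hm
    rw [← Bool.not_eq_false, pvSafe_false_iff] at hs
    exact hs hm
  · rw [if_neg hs, if_pos]
    rw [Bool.not_eq_true] at hs
    rw [pvMarked_iff bombs n m i j hi hj]
    exact (pvSafe_false_iff bombs (i:Int) (j:Int)).mp hs
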